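-- pv_equiv track=rewrite | github.com/LeeJ156/megait_python_20201020 | 07_tuple/quiz01/quiz01.py | sum_limit_100
-- ===== SOURCE A (Python) =====
-- def sum_limit_100(num):
--     # 합
--     sum = 0
--     last_num = 0
--     for i in range(1, num + 1): # 1 + +.. num
--         sum += i
--         last_num = i
--         if sum > 100:
--             break
--     return (sum, last_num)
-- ===== SOURCE B (Python) =====
-- def sum_limit_100(num):
--     # Closed form: the loop stops exactly at i = 14 (T(14) = 105 > 100),
--     # so the last term is num clamped to [0, 14] and the sum is triangular.
--     last = min(max(num, 0), 14)
--     return (last * (last + 1) // 2, last)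
-- ===== Notes on version B (the rewrite author's own statement) =====
-- stated objective: simpler
-- what changed: Replaced the accumulate-and-break loop by a closed-form triangular-number formula on num clamped to [0,14] (the break point).
import Mathlib
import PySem

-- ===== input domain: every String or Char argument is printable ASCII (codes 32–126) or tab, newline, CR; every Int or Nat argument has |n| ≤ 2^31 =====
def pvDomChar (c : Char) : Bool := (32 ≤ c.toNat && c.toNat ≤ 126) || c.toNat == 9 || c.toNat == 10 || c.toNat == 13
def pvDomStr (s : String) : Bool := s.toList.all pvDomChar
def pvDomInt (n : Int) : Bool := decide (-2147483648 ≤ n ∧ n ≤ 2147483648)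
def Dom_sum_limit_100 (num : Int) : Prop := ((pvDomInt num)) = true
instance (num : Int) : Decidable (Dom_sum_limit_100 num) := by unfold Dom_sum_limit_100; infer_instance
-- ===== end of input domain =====

-- B replaces A's accumulate-and-break loop by a closed-form triangular formula on num clamped to [0,14] (simpler).

-- ===== PORT A =====
-- loop body of A: sum += i; last_num = i; if sum > 100: break
def sumLimitLoopA : List Int → Int × Int → Int × Int
  | [], st => st
  | i :: rest, (s, _) =>
      let s' := s + i
      if s' > 100 then (s', i) else sumLimitLoopA rest (s', i)

def sum_limit_100 (num : Int) : Int × Int :=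
  sumLimitLoopA (PySem.List.pyRange 1 (num + 1) 1) (0, 0)

-- ===== PORT B =====
def sum_limit_100_alt (num : Int) : Int × Int :=
  let last := min (max num 0) 14
  (PySem.Int.floordiv (last * (last + 1)) 2, last)

-- ===== PRECONDITION & SPEC =====
def Spec_sum_limit_100 (num : Int) (out : Int × Int) : Prop := out = sum_limit_100_alt num
instance (num : Int) (out : Int × Int) : Decidable (Spec_sum_limit_100 num out) := by unfold Spec_sum_limit_100; infer_instance

-- ===== CLAIM (what is proved, stated in full; the proofs are below) =====
def Claim_equal_sum_limit_100 : Prop := ∀ (num : Int), Dom_sum_limit_100 num → Spec_sum_limit_100 num (sum_limit_100 num)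

-- ===== LEMMAS AND PROOFS =====

-- once the loop has consumed 1..14 the sum is 105 > 100 and it breaks, whatever follows
theorem sumLimitLoopA_break (rest : List Int) :
    sumLimitLoopA ([1,2,3,4,5,6,7,8,9,10,11,12,13,14] ++ rest) (0, 0) = (105, 14) := by
  norm_num [sumLimitLoopA]

theorem pyRange_1_15 : PySem.List.pyRange 1 15 1 = [1,2,3,4,5,6,7,8,9,10,11,12,13,14] := by
  decide

-- ===== VERDICT (by name: the statement is the Claim_ definition above) =====
theorem sum_limit_100_spec : Claim_equal_sum_limit_100 := by
  intro num _
  unfold Spec_sum_limit_100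
  by_cases h0 : num ≤ 0
  · have hnil : PySem.List.pyRange 1 (num + 1) 1 = [] :=
      PySem.List.pyRange_one_eq_nil (by omega)
    simp [sum_limit_100, sum_limit_100_alt, hnil, sumLimitLoopA,
      max_eq_right h0, PySem.Int.floordiv]
  · by_cases h14 : 14 ≤ num
    · have hsplit : PySem.List.pyRange 1 (num + 1) 1 =
          PySem.List.pyRange 1 15 1 ++ PySem.List.pyRange 15 (num + 1) 1 :=
        PySem.List.pyRange_one_append 1 15 (num + 1) (by omega) (by omega)
      rw [sum_limit_100, hsplit, pyRange_1_15, sumLimitLoopA_break]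
      have h1 : max num 0 = num := max_eq_left (by omega)
      have h2 : min num 14 = 14 := min_eq_right h14
      simp [sum_limit_100_alt, h1, h2]
    · have h1 : 1 ≤ num := by omega
      have h2 : num ≤ 13 := by omega
      interval_cases num <;> decide
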